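-- pv_equiv track=rewrite | github.com/careweather/SerialKiller2 | merge_csv_rows.py | rows_are_complementary
-- ===== SOURCE A (Python) =====
-- def parse_value(val):
--     """Parse a CSV value, returning None for empty strings."""
--     if val is None or val.strip() == '':
--         return None
--     try:
--         return float(val)
--     except ValueError:
--         return val
--
-- def rows_are_complementary(row1, row2, time_col=0):
--     """
--     Check if two rows have complementary data (non-overlapping values).
--     Returns True if they can be safely merged without losing data.
--     """
--     for i, (v1, v2) in enumerate(zip(row1, row2)):
--         if i == time_col:
--             continue
--         val1 = parse_value(v1)
--         val2 = parse_value(v2)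
--         # If both have values, they overlap (not complementary)
--         if val1 is not None and val2 is not None:
--             return False
--     return True
-- ===== SOURCE B (Python) =====
-- def parse_value(val):
--     """Parse a CSV value, returning None for empty strings."""
--     if val is None or val.strip() == '':
--         return None
--     try:
--         return float(val)
--     except ValueError:
--         return val
--
-- def rows_are_complementary(row1, row2, time_col=0):
--     """Rows are complementary iff their sets of filled columns (excluding
--     time_col) are disjoint.  Built from the zipped pairs so truncation to
--     the shorter row matches."""
--     filled1 = set()
--     filled2 = set()
--     for i, (v1, v2) in enumerate(zip(row1, row2)):
--         if i == time_col:
--             continue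
--         if parse_value(v1) is not None:
--             filled1.add(i)
--         if parse_value(v2) is not None:
--             filled2.add(i)
--     return filled1.isdisjoint(filled2)
-- ===== Notes on version B (the rewrite author's own statement) =====
-- stated objective: alternative
-- what changed: Instead of A's early-return scan for a column where both rows are filled, B collects the sets of filled column indices of each row in one pass over the zipped pairs and returns whether the two sets are disjoint.
import Mathlib
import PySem

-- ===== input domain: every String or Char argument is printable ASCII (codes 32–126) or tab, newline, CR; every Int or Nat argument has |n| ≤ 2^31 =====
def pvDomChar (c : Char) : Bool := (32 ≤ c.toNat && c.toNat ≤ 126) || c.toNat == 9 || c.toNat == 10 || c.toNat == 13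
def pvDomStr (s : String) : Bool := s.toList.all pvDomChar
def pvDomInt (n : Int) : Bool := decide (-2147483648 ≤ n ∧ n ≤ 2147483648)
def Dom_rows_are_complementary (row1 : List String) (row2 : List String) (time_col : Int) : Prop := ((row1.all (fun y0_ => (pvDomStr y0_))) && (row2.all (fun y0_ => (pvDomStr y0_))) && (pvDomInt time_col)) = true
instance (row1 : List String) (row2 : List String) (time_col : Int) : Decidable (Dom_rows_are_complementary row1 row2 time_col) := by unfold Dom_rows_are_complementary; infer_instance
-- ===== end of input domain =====

-- B replaces A's early-return scan by collecting the sets of filled column indices of each row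
-- in one pass over the zipped pairs and testing the two sets for disjointness (alternative, same cost).


-- ===== PORT A =====
-- parse_value(v) is None iff v.strip() == ''; the float/str distinction never affects 'is not None',
-- so both ports only need this None-test (exact on the ASCII domain via PySem.Str.strip).
def pvParseIsNone (val : String) : Bool := PySem.Str.strip val == ""

-- A's loop: walk the zipped pairs with index i, early return False on the first
-- non-time column where both values parse to non-None.
def pvLoopA : List (String × String) → Int → Int → Bool
  | [], _, _ => true
  | (v1, v2) :: rest, i, tc =>
      if i = tc then pvLoopA rest (i + 1) tc
      else if !pvParseIsNone v1 && !pvParseIsNone v2 then false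
      else pvLoopA rest (i + 1) tc

def rows_are_complementary (row1 : List String) (row2 : List String) (time_col : Int) : Bool :=
  pvLoopA (row1.zip row2) 0 time_col

-- ===== PORT B =====
-- B's loop: collect the filled column indices of each row into two sets.
def pvFill : List (String × String) → Int → Int → PySem.Set Int → PySem.Set Int → PySem.Set Int × PySem.Set Int
  | [], _, _, s1, s2 => (s1, s2)
  | (v1, v2) :: rest, i, tc, s1, s2 =>
      if i = tc then pvFill rest (i + 1) tc s1 s2
      else
        pvFill rest (i + 1) tc
          (if !pvParseIsNone v1 then PySem.Set.add s1 i else s1)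
          (if !pvParseIsNone v2 then PySem.Set.add s2 i else s2)

def rows_are_complementary_alt (row1 : List String) (row2 : List String) (time_col : Int) : Bool :=
  let p := pvFill (row1.zip row2) 0 time_col PySem.Set.empty PySem.Set.empty
  PySem.Set.isdisjoint p.1 p.2

-- ===== PRECONDITION & SPEC =====
def Spec_rows_are_complementary (row1 : List String) (row2 : List String) (time_col : Int) (out : Bool) : Prop := out = rows_are_complementary_alt row1 row2 time_col
instance (row1 : List String) (row2 : List String) (time_col : Int) (out : Bool) : Decidable (Spec_rows_are_complementary row1 row2 time_col out) := by unfold Spec_rows_are_complementary; infer_instance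

-- ===== CLAIM (what is proved, stated in full; the proofs are below) =====
def Claim_equal_rows_are_complementary : Prop := ∀ (row1 : List String) (row2 : List String) (time_col : Int), Dom_rows_are_complementary row1 row2 time_col → Spec_rows_are_complementary row1 row2 time_col (rows_are_complementary row1 row2 time_col)

-- ===== LEMMAS AND PROOFS =====

theorem pv_isdisjoint_add_left {s t : PySem.Set Int} {x : Int} (hx : x ∉ t) :
    PySem.Set.isdisjoint (PySem.Set.add s x) t = PySem.Set.isdisjoint s t := by
  rw [Bool.eq_iff_iff, PySem.Set.isdisjoint_iff, PySem.Set.isdisjoint_iff]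
  constructor
  · intro h y hy
    exact h y ((PySem.Set.mem_add _ _ _).mpr (Or.inl hy))
  · intro h y hy
    rw [PySem.Set.mem_add] at hy; rcases hy with h' | rfl
    · exact h y h'
    · exact hx

theorem pv_isdisjoint_add_right {s t : PySem.Set Int} {x : Int} (hx : x ∉ s) :
    PySem.Set.isdisjoint s (PySem.Set.add t x) = PySem.Set.isdisjoint s t := by
  rw [Bool.eq_iff_iff, PySem.Set.isdisjoint_iff, PySem.Set.isdisjoint_iff]
  constructor
  · intro h y hy hyt
    exact h y hy ((PySem.Set.mem_add _ _ _).mpr (Or.inl hyt))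
  · intro h y hy hyt
    rw [PySem.Set.mem_add] at hyt; rcases hyt with h' | rfl
    · exact h y hy h'
    · exact hx hy

theorem pv_isdisjoint_add_both (s t : PySem.Set Int) (x : Int) :
    PySem.Set.isdisjoint (PySem.Set.add s x) (PySem.Set.add t x) = false := by
  rw [Bool.eq_false_iff]
  intro h
  exact ((PySem.Set.isdisjoint_iff _ _).mp h) x ((PySem.Set.mem_add _ _ _).mpr (Or.inr rfl))
    ((PySem.Set.mem_add _ _ _).mpr (Or.inr rfl))

-- invariant: disjointness of the filled sets = incoming disjointness && A's loop result,
-- provided every index already in the accumulators is below the current index.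
theorem pv_fill_key (l : List (String × String)) (i tc : Int) (s1 s2 : PySem.Set Int)
    (h1 : ∀ x ∈ s1, x < i) (h2 : ∀ x ∈ s2, x < i) :
    PySem.Set.isdisjoint (pvFill l i tc s1 s2).1 (pvFill l i tc s1 s2).2
      = (PySem.Set.isdisjoint s1 s2 && pvLoopA l i tc) := by
  induction l generalizing i s1 s2 with
  | nil => simp [pvFill, pvLoopA]
  | cons p rest ih =>
    obtain ⟨v1, v2⟩ := p
    have fresh1 : ∀ x ∈ s1, x < i + 1 := fun x hx => by have := h1 x hx; omega
    have fresh2 : ∀ x ∈ s2, x < i + 1 := fun x hx => by have := h2 x hx; omega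
    have fresh1' : ∀ x ∈ PySem.Set.add s1 i, x < i + 1 := fun x hx => by
      rw [PySem.Set.mem_add] at hx
      rcases hx with h' | rfl
      · have := h1 x h'; omega
      · omega
    have fresh2' : ∀ x ∈ PySem.Set.add s2 i, x < i + 1 := fun x hx => by
      rw [PySem.Set.mem_add] at hx
      rcases hx with h' | rfl
      · have := h2 x h'; omega
      · omega
    by_cases htc : i = tc
    · simp only [pvFill, pvLoopA, if_pos htc]
      exact ih (i + 1) s1 s2 fresh1 fresh2
    · cases f1 : (!pvParseIsNone v1) <;> cases f2 : (!pvParseIsNone v2) <;>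
        simp only [pvFill, pvLoopA, if_neg htc, f1, f2, Bool.and_self, Bool.and_false,
          Bool.false_and, Bool.false_eq_true, if_false, if_true]
      · exact ih (i + 1) s1 s2 fresh1 fresh2
      · rw [ih (i + 1) s1 (PySem.Set.add s2 i) fresh1 fresh2']
        rw [pv_isdisjoint_add_right (fun hm => absurd (h1 i hm) (by omega))]
      · rw [ih (i + 1) (PySem.Set.add s1 i) s2 fresh1' fresh2]
        rw [pv_isdisjoint_add_left (fun hm => absurd (h2 i hm) (by omega))]
      · rw [ih (i + 1) (PySem.Set.add s1 i) (PySem.Set.add s2 i) fresh1' fresh2']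
        rw [pv_isdisjoint_add_both]
        simp

-- ===== VERDICT (by name: the statement is the Claim_ definition above) =====
theorem rows_are_complementary_spec : Claim_equal_rows_are_complementary := by
  intro row1 row2 time_col _
  unfold Spec_rows_are_complementary rows_are_complementary rows_are_complementary_alt
  rw [pv_fill_key (row1.zip row2) 0 time_col PySem.Set.empty PySem.Set.empty
    (fun x hx => by cases hx) (fun x hx => by cases hx)]
  simp [PySem.Set.empty, PySem.Set.isdisjoint]
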